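-- pv_equiv track=rewrite | github.com/goldwinsonick/tubes-daspro-2023 | recursion.py | appends
-- ===== SOURCE A (Python) =====
-- from typing import List, Union
--
-- def length(arr: List, lengthArray: int = -1) -> int:
--     panjang: int = 0
--     if lengthArray != -1:
--         return lengthArray
--     elif arr == []:
--         return 0
--     else:
--         while (arr[panjang] != None):
--             panjang += 1
--         return panjang
--
-- def findEmptyArrayIndex(arr: List, index: int = 0, lengthArray: int = -1) -> int:
--     arr_len: int = length(arr, lengthArray)
--     if index > arr_len:
--         return -99
--     elif arr[index] == None and (arr[-2] == None and arr[-1] == None):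
--         return index
--     else:
--         return findEmptyArrayIndex(arr, index + 1, arr_len)
--
-- def appends(arr: list, new_values: List):
--     temp_new_arr:List = [None for i in range(length(arr)+2)]
--     # copy data dari arr sebelumnya
--     for i in range(length(arr)):
--         temp_new_arr[i] = arr[i]
--     # Copy data baru dengan mark baru ke arr sebelumnya
--     empty_index_array_temp_arr:int = findEmptyArrayIndex(
--         temp_new_arr)
--     temp_new_arr[empty_index_array_temp_arr] = new_values
--     # Kembalikan ke arr dengan data yang sudah update
--     arr:List = temp_new_arr
--     return arr
-- ===== SOURCE B (Python) =====
-- def appends(arr, new_values):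
--     n = arr.index(None) if None in arr else len(arr)
--     return arr[:n] + [new_values, None]
-- ===== Notes on version B (the rewrite author's own statement) =====
-- stated objective: simpler
-- what changed: B finds the first None slot with list.index and returns arr[:n] + [new_values, None] directly, dropping A's None-filled temp allocation, the element-by-element copy loop and the whole recursive findEmptyArrayIndex pass.
import Mathlib
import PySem

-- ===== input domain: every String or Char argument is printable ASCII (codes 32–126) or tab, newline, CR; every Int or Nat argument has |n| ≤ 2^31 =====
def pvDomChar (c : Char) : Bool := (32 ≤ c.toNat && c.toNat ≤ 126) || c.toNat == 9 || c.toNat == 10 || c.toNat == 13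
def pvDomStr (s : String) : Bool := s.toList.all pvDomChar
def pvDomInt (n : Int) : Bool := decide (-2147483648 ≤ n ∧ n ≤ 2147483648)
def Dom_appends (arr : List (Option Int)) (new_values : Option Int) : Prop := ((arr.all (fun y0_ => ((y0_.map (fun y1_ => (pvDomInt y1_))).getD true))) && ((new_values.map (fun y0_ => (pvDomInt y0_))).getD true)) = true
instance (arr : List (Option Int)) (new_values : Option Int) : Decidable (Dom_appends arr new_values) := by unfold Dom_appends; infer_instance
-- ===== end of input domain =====

-- B replaces A's zero-fill allocation, copy loop and recursive findEmptyArrayIndex by a single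
-- first-None scan and one slice-plus-append (objective: simpler); return value only, A mutates nothing.

-- ===== PORT A =====
-- `length`'s while loop: panjang advances while arr[panjang] != None; an out-of-range access
-- (Python IndexError) is modelled by returning the current counter — such inputs are outside Pre_appends.
def lenLoop (arr : List (Option Int)) (panjang : Nat) (fuel : Nat) : Nat :=
  match fuel with
  | 0 => panjang
  | f + 1 =>
    match PySem.List.pyGet? arr (panjang : Int) with
    | some none => panjang
    | some (some _) => lenLoop arr (panjang + 1) f
    | none => panjang

def lengthPy (arr : List (Option Int)) (lengthArray : Int) : Int :=
  if lengthArray ≠ -1 then lengthArray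
  else if arr = [] then 0
  else (lenLoop arr 0 (arr.length + 1) : Nat)

-- fuel only bounds the recursion depth; it is ample for the calls `appends` makes inside Pre_appends
def findEmptyArrayIndex (arr : List (Option Int)) (index : Int) (lengthArray : Int) (fuel : Nat) : Int :=
  match fuel with
  | 0 => -99
  | f + 1 =>
    let arr_len := lengthPy arr lengthArray
    if index > arr_len then -99
    else if PySem.List.pyGet? arr index = some none ∧
            PySem.List.pyGet? arr (-2) = some none ∧
            PySem.List.pyGet? arr (-1) = some none then index
    else findEmptyArrayIndex arr (index + 1) arr_len f

def appends (arr : List (Option Int)) (new_values : Option Int) : List (Option Int) :=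
  let temp0 := (PySem.List.pyRange 0 (lengthPy arr (-1) + 2) 1).map (fun _ => (none : Option Int))
  let temp := (PySem.List.pyRange 0 (lengthPy arr (-1)) 1).foldl
      (fun t i => PySem.List.pySetD t i (PySem.List.pyGetD arr i none)) temp0
  let e := findEmptyArrayIndex temp 0 (-1) (temp.length + 2)
  PySem.List.pySetD temp e new_values

-- ===== PORT B =====
def appends_alt (arr : List (Option Int)) (new_values : Option Int) : List (Option Int) :=
  let n : Int := if none ∈ arr then ((PySem.List.index? arr none).getD 0 : Nat) else (arr.length : Nat)
  PySem.List.slice arr none (some n) ++ [new_values, none]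

-- ===== PRECONDITION & SPEC =====
-- A's length() scans for a None sentinel: on a non-empty list without None it raises IndexError.
def Pre_appends (arr : List (Option Int)) (new_values : Option Int) : Prop :=
  arr = [] ∨ none ∈ arr
instance (arr : List (Option Int)) (new_values : Option Int) : Decidable (Pre_appends arr new_values) := by unfold Pre_appends; infer_instance
def pvWitness_appends : List (Option Int) × Option Int := ([some 1, none], some 2)

def Spec_appends (arr : List (Option Int)) (new_values : Option Int) (out : List (Option Int)) : Prop := out = appends_alt arr new_values
instance (arr : List (Option Int)) (new_values : Option Int) (out : List (Option Int)) : Decidable (Spec_appends arr new_values out) := by unfold Spec_appends; infer_instance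

-- ===== CLAIM (what is proved, stated in full; the proofs are below) =====
def Claim_equal_appends : Prop := ∀ (arr : List (Option Int)) (new_values : Option Int), Dom_appends arr new_values → Pre_appends arr new_values → Spec_appends arr new_values (appends arr new_values)

-- ===== LEMMAS AND PROOFS =====

theorem lenLoop_spec (fuel : Nat) : ∀ (arr : List (Option Int)) (j : Nat),
    none ∈ arr.drop j → arr.length ≤ j + fuel →
    lenLoop arr j fuel = j + (arr.drop j).idxOf none := by
  induction fuel with
  | zero =>
    intro arr j hmem hlen
    exfalso
    have : arr.drop j ≠ [] := List.ne_nil_of_mem hmem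
    have : j < arr.length := by
      by_contra h
      exact this (List.drop_eq_nil_of_le (by omega))
    omega
  | succ f ih =>
    intro arr j hmem hlen
    have hj : j < arr.length := by
      by_contra h
      exact List.ne_nil_of_mem hmem (List.drop_eq_nil_of_le (by omega))
    have hdrop : arr.drop j = arr[j] :: arr.drop (j + 1) := List.drop_eq_getElem_cons hj
    have hget : PySem.List.pyGet? arr (j : Int) = some arr[j] := by
      simp [PySem.List.pyGet?_natCast, List.getElem?_eq_getElem hj]
    cases hx : arr[j] with
    | none =>
      simp only [lenLoop, hget, hx]
      rw [hdrop, hx, List.idxOf_cons_self]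
      omega
    | some v =>
      simp only [lenLoop, hget, hx]
      have hmem' : none ∈ arr.drop (j + 1) := by
        rw [hdrop, hx] at hmem
        simpa using hmem
      rw [ih arr (j + 1) hmem' (by omega)]
      rw [hdrop, hx, List.idxOf_cons_ne _ (by simp)]
      omega

theorem copyLoop (arr : List (Option Int)) : ∀ (n : Nat) (t0 : List (Option Int)),
    n ≤ arr.length → n ≤ t0.length →
    (PySem.List.pyRange 0 (n : Int) 1).foldl
      (fun t i => PySem.List.pySetD t i (PySem.List.pyGetD arr i none)) t0
    = arr.take n ++ t0.drop n := by
  intro n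
  induction n with
  | zero => intro t0 _ _; simp [PySem.List.pyRange_one_eq_nil]
  | succ n ih =>
    intro t0 hn ht
    have hcast : ((n + 1 : Nat) : Int) = (n : Int) + 1 := by push_cast; ring
    rw [hcast, PySem.List.pyRange_one_succ_right (by positivity), List.foldl_append,
        ih t0 (by omega) (by omega)]
    simp only [List.foldl_cons, List.foldl_nil, PySem.List.pySetD_natCast,
      PySem.List.pyGetD_natCast]
    have hn' : n < arr.length := by omega
    have ht' : n < t0.length := by omega
    rw [List.getD_eq_getElem arr none hn']
    rw [List.set_append]
    simp only [List.length_take, min_eq_left (le_of_lt hn'), lt_irrefl]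
    rw [Nat.sub_self, List.drop_eq_getElem_cons ht', List.set_cons_zero]
    rw [← List.take_concat_get (l := arr) (i := n) (h := hn'), List.concat_eq_append,
      List.append_assoc]
    rfl

theorem range_map_none (m : Nat) :
    (PySem.List.pyRange 0 (m : Int) 1).map (fun _ => (none : Option Int))
    = List.replicate m none := by
  rw [List.eq_replicate_iff]
  constructor
  · simp [PySem.List.length_pyRange_one]
  · intro b hb
    simp only [List.mem_map] at hb
    obtain ⟨_, _, h⟩ := hb
    exact h.symm

theorem idxOf_first (pre suf : List (Option Int)) (hpre : none ∉ pre) :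
    (pre ++ none :: suf).idxOf none = pre.length := by
  induction pre with
  | nil => simp
  | cons x xs ih =>
    have hx : x ≠ none := by intro h; exact hpre (by simp [h])
    simp only [List.cons_append, List.idxOf_cons_ne _ (by simpa using hx),
      ih (fun h => hpre (List.mem_cons_of_mem _ h)), List.length_cons]

theorem lengthPy_first (pre suf : List (Option Int)) (hpre : none ∉ pre) :
    lengthPy (pre ++ none :: suf) (-1) = (pre.length : Int) := by
  have hne : pre ++ none :: suf ≠ [] := by simp
  have hmem : none ∈ pre ++ none :: suf := by simp
  rw [lengthPy, if_neg (by simp), if_neg hne]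
  rw [lenLoop_spec _ _ 0 (by simpa using hmem) (by omega)]
  simp [idxOf_first pre suf hpre]

theorem findLoop_spec (pre : List (Option Int)) (hpre : none ∉ pre) :
    ∀ (fuel : Nat) (j : Nat) (la : Int), j ≤ pre.length → pre.length - j < fuel →
    lengthPy (pre ++ [none, none]) la = (pre.length : Int) →
    findEmptyArrayIndex (pre ++ [none, none]) (j : Int) la fuel = (pre.length : Int) := by
  intro fuel
  induction fuel with
  | zero => intro j la hj hf _; omega
  | succ f ih =>
    intro j la hj hf hla
    simp only [findEmptyArrayIndex, hla]
    rw [if_neg (by push_cast; omega)]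
    by_cases hjn : j = pre.length
    · subst hjn
      rw [if_pos]
      constructor
      · have : pre ++ [none, none] = pre ++ none :: [none] := rfl
        rw [this, PySem.List.pyGet?_append_length]
      constructor
      · have hlen : 2 ≤ (pre ++ [none, none]).length := by simp
        rw [PySem.List.pyGet?_neg_ofNat _ 2 (by omega) hlen]
        have : (pre ++ [none, none]).length - 2 = pre.length := by simp
        rw [this, List.getElem?_append_right (le_refl _)]
        simp
      · rw [PySem.List.pyGet?_neg_one]
        have : pre ++ [none, none] = (pre ++ [none]) ++ [none] := by simp
        rw [this, List.getLast?_concat]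
    · have hjlt : j < pre.length := by omega
      rw [if_neg, show (j : Int) + 1 = ((j + 1 : Nat) : Int) by push_cast; ring]
      · exact ih (j + 1) _ (by omega) (by omega)
          (by rw [lengthPy, if_pos (show (pre.length : Int) ≠ -1 by omega)])
      · intro ⟨h1, _, _⟩
        rw [PySem.List.pyGet?_natCast, List.getElem?_append_left hjlt,
          List.getElem?_eq_getElem hjlt] at h1
        have : pre[j] ∈ pre := List.getElem_mem _
        rw [Option.some_inj.mp h1] at this
        exact hpre this

theorem appends_eq_first (pre suf : List (Option Int)) (hpre : none ∉ pre)
    (new_values : Option Int) :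
    appends (pre ++ none :: suf) new_values = pre ++ [new_values, none] := by
  set arr := pre ++ none :: suf with harr
  have hlen : lengthPy arr (-1) = (pre.length : Int) := lengthPy_first pre suf hpre
  have hnle : pre.length ≤ arr.length := by simp [harr]
  rw [appends]
  simp only [hlen]
  have hcast2 : (pre.length : Int) + 2 = ((pre.length + 2 : Nat) : Int) := by push_cast; ring
  rw [hcast2, range_map_none]
  rw [copyLoop arr pre.length (List.replicate (pre.length + 2) none) hnle (by simp)]
  have htake : arr.take pre.length = pre := by
    rw [harr, List.take_left]
  have hdrop : (List.replicate (pre.length + 2) (none : Option Int)).drop pre.length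
      = [none, none] := by
    rw [List.drop_replicate]
    simp [List.replicate]
  rw [htake, hdrop]
  have hfind := findLoop_spec pre hpre ((pre.length + 2) + 2) 0 (-1) (by omega) (by omega)
    (lengthPy_first pre [none] hpre)
  rw [show ((0 : Nat) : Int) = (0 : Int) from rfl,
     show pre.length + 2 + 2 = (pre ++ [none, none]).length + 2 by simp] at hfind
  rw [hfind, PySem.List.pySetD_natCast, List.set_append]
  rw [if_neg (lt_irrefl _), Nat.sub_self, List.set_cons_zero]

theorem alt_eq_first (pre suf : List (Option Int)) (hpre : none ∉ pre)
    (new_values : Option Int) :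
    appends_alt (pre ++ none :: suf) new_values = pre ++ [new_values, none] := by
  rw [appends_alt]
  have hmem : none ∈ pre ++ none :: suf := by simp
  have hidx : PySem.List.index? (pre ++ none :: suf) none = some pre.length := by
    rw [PySem.List.index?_eq_some_iff]
    exact ⟨pre, suf, rfl, rfl, hpre⟩
  simp only [if_pos hmem, hidx, Option.getD_some]
  rw [PySem.List.slice_to_natCast, List.take_left]

-- ===== VERDICT (by name: the statement is the Claim_ definition above) =====
theorem appends_spec : Claim_equal_appends := by
  unfold Claim_equal_appends
  intro arr new_values _ hpre
  unfold Spec_appends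
  rcases hpre with h | h
  · subst h
    have hA : appends [] new_values = [new_values, none] := by
      rw [appends]
      have h1 : lengthPy [] (-1) = 0 := by rw [lengthPy]; simp
      simp only [h1]
      rw [show (0 : Int) + 2 = ((2 : Nat) : Int) by norm_num, range_map_none]
      rw [PySem.List.pyRange_one_eq_nil (le_refl 0), List.foldl_nil]
      have hfind := findLoop_spec [] (by simp) 4 0 (-1) (by simp) (by simp)
        (lengthPy_first [] [none] (by simp))
      simp only [List.nil_append, List.length_nil] at hfind
      rw [show List.replicate 2 (none : Option Int) = [none, none] from rfl]
      rw [show ([none, none] : List (Option Int)).length + 2 = 4 from rfl]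
      rw [show ((0 : Nat) : Int) = (0 : Int) from rfl] at hfind
      rw [hfind]
      rfl
    have hB : appends_alt [] new_values = [new_values, none] := by
      rw [appends_alt]; simp [PySem.List.slice]
    rw [hA, hB]
  · obtain ⟨k, hk⟩ := Option.isSome_iff_exists.mp ((PySem.List.index?_isSome_iff arr none).mpr h)
    obtain ⟨pre, suf, heq, _, hpre⟩ := (PySem.List.index?_eq_some_iff arr none k).mp hk
    subst heq
    rw [appends_eq_first pre suf hpre, alt_eq_first pre suf hpre]
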